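-- pv_equiv track=rewrite | github.com/FosterBirnbaum/PottsMPNN | training/boltz2_features.py | _combine_chain_msas
-- ===== SOURCE A (Python) =====
-- def _combine_chain_msas(chain_msas: list[list[str]]) -> list[str]:
--     if not chain_msas:
--         return []
--     depth = max(len(msa) for msa in chain_msas)
--     combined = []
--     for idx in range(depth):
--         parts = []
--         for msa in chain_msas:
--             pick = msa[idx] if idx < len(msa) else msa[0]
--             parts.append(pick)
--         combined.append("".join(parts))
--     return combined
-- ===== SOURCE B (Python) =====
-- def _combine_chain_msas(chain_msas: list[list[str]]) -> list[str]:
--     if not chain_msas: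
--         return []
--     depth = max(len(msa) for msa in chain_msas)
--     combined = [""] * depth
--     for msa in chain_msas:
--         merged = [p + row for p, row in zip(combined, msa)]
--         rest = combined[len(msa):]
--         if rest:
--             filler = msa[0]
--             merged += [p + filler for p in rest]
--         combined = merged
--     return combined
-- ===== Notes on version B (the rewrite author's own statement) =====
-- stated objective: alternative
-- what changed: B replaces A's row-wise gather (outer loop over row indices, inner scan over chains with a per-cell bounds test and a final join) by a left fold over the chains that maintains one growing partial-concatenation string per row, extending the tail rows of a short chain with its first row.
import Mathlib
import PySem

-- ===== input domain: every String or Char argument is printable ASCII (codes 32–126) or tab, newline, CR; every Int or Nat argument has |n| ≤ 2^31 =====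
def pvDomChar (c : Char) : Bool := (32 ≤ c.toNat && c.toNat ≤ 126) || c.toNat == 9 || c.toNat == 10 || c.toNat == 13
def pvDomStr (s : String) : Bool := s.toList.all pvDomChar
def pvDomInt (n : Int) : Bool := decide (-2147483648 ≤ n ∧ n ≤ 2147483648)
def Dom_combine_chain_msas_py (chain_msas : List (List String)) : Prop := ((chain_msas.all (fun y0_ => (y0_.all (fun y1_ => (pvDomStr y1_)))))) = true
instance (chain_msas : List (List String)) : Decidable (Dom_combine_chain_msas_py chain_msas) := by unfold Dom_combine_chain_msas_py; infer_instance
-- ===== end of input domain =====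

-- B folds over the chains, accumulating one growing partial-concatenation string per output row,
-- instead of A's row-index outer loop with an inner per-chain pick and join; objective: alternative, same cost.

-- ===== PORT A =====
-- max(len(msa) for msa in chain_msas), only called with chain_msas ≠ [] (Python max = running max)
def pvDepth (chain_msas : List (List String)) : Nat :=
  match chain_msas.map List.length with
  | [] => 0
  | x :: t => t.foldl max x

def combine_chain_msas_py (chain_msas : List (List String)) : List String :=
  if chain_msas = [] then []
  else
    let depth := pvDepth chain_msas
    -- for idx in range(depth): pick per chain (msa[idx] / msa[0]; getD's default "" is only
    -- reached where Python raises IndexError, excluded by Pre_), then "".join(parts)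
    (List.range depth).map (fun idx =>
      PySem.Str.join "" (chain_msas.map (fun msa =>
        if idx < msa.length then msa.getD idx "" else msa.getD 0 "")))

-- ===== PORT B =====
-- one pass of B's loop body: merged = [p + row for p, row in zip(combined, msa)];
-- rest = combined[len(msa):] (start ≥ 0 and ≤ len: the slice is exactly List.drop);
-- if rest: merged += [p + msa[0] for p in rest]  (msa.getD 0 "" = msa[0]; the default ""
-- is only reached where Python raises IndexError, excluded by Pre_)
def pvStep (combined : List String) (msa : List String) : List String :=
  let merged := (combined.zip msa).map (fun pr => pr.1 ++ pr.2)
  let rest := combined.drop msa.length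
  if rest ≠ [] then merged ++ rest.map (fun p => p ++ msa.getD 0 "") else merged

def combine_chain_msas_py_alt (chain_msas : List (List String)) : List String :=
  if chain_msas = [] then []
  else
    let depth := pvDepth chain_msas
    chain_msas.foldl pvStep (List.replicate depth "")

-- ===== PRECONDITION & SPEC =====
-- Pre_ excludes only the inputs where A raises IndexError (msa[0] on an empty chain MSA while
-- another chain's MSA is nonempty); everywhere A returns, Pre_ holds.
def Pre_combine_chain_msas_py (chain_msas : List (List String)) : Prop :=
  (∀ msa ∈ chain_msas, msa ≠ []) ∨ (∀ msa ∈ chain_msas, msa = [])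
instance (chain_msas : List (List String)) : Decidable (Pre_combine_chain_msas_py chain_msas) := by unfold Pre_combine_chain_msas_py; infer_instance

def pvWitness_combine_chain_msas_py : List (List String) := [["AB", "CD"], ["EF"]]

def Spec_combine_chain_msas_py (chain_msas : List (List String)) (out : List String) : Prop := out = combine_chain_msas_py_alt chain_msas
instance (chain_msas : List (List String)) (out : List String) : Decidable (Spec_combine_chain_msas_py chain_msas out) := by unfold Spec_combine_chain_msas_py; infer_instance

-- ===== CLAIM (what is proved, stated in full; the proofs are below) =====
def Claim_equal_combine_chain_msas_py : Prop := ∀ (chain_msas : List (List String)), Dom_combine_chain_msas_py chain_msas → Pre_combine_chain_msas_py chain_msas → Spec_combine_chain_msas_py chain_msas (combine_chain_msas_py chain_msas)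

-- ===== LEMMAS AND PROOFS =====

-- A's per-cell pick, as a function of the row index
def pvPick (msa : List String) (i : Nat) : String :=
  if i < msa.length then msa.getD i "" else msa.getD 0 ""

theorem intercalate_nil_eq_flatten (l : List (List Char)) : [].intercalate l = l.flatten := by
  induction l with
  | nil => rfl
  | cons x t ih =>
    cases t with
    | nil => simp [List.intercalate]
    | cons y s =>
      simp only [List.intercalate] at ih ⊢
      simp [List.intersperse] at ih ⊢
      exact ih

theorem join_empty_nil : PySem.Str.join "" ([] : List String) = "" := rfl

theorem join_empty_cons (x : String) (l : List String) :
    PySem.Str.join "" (x :: l) = x ++ PySem.Str.join "" l := by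
  apply String.toList_inj.mp
  simp [pysem, PySem.Chars.join, intercalate_nil_eq_flatten]

-- every chain's length is at most the computed depth
theorem len_le_pvDepth (chain_msas : List (List String)) (msa : List String)
    (h : msa ∈ chain_msas) : msa.length ≤ pvDepth chain_msas := by
  unfold pvDepth
  have h' : msa.length ∈ chain_msas.map List.length := List.mem_map_of_mem h
  rcases hm : chain_msas.map List.length with _ | ⟨x, t⟩
  · simp [hm] at h'
  · rw [hm] at h'
    rcases List.mem_cons.1 h' with rfl | ht
    · exact (PySem.List.le_foldl_max t msa.length).1
    · exact (PySem.List.le_foldl_max t x).2 _ ht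

-- one pvStep on a range-shaped accumulator appends each row's pick
theorem pvStep_map_range (n : Nat) (g : Nat → String) (msa : List String)
    (hle : msa.length ≤ n) :
    pvStep ((List.range n).map g) msa = (List.range n).map (fun i => g i ++ pvPick msa i) := by
  unfold pvStep
  by_cases hrest : (((List.range n).map g).drop msa.length) = []
  · -- rest = []: msa.length = n, everything handled by the zip
    have hlen : n ≤ msa.length := by
      have := List.length_eq_zero_iff.2 hrest
      simp at this
      omega
    have hmn : msa.length = n := Nat.le_antisymm hle hlen
    simp only [hrest, ne_eq, not_true_eq_false, if_false]
    apply List.ext_getElem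
    · simp [hmn]
    · intro i h1 h2
      simp only [List.getElem_map, List.getElem_zip, List.getElem_range]
      have hi : i < msa.length := by simp [hmn] at h1; omega
      rw [pvPick, if_pos hi, List.getD_eq_getElem _ _ hi]
  · -- rest ≠ []: msa.length < n, tail rows get msa[0]
    simp only [hrest, ne_eq, not_false_eq_true, if_true]
    have hlt : msa.length < n := by
      by_contra h
      exact hrest (by simp; omega)
    apply List.ext_getElem
    · simp; omega
    · intro i h1 h2
      simp only [List.length_map, List.length_range] at h1 h2 ⊢
      by_cases hi : i < msa.length
      · rw [List.getElem_append_left (by simp; omega)]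
        simp only [List.getElem_map, List.getElem_zip, List.getElem_range]
        rw [pvPick, if_pos hi, List.getD_eq_getElem _ _ hi]
      · rw [List.getElem_append_right (by simp; omega)]
        simp only [List.getElem_map, List.getElem_drop, List.getElem_range, pvPick, if_neg hi,
          List.length_map, List.length_zip, List.length_range]
        congr 2
        omega

-- the whole fold: each row ends as its accumulator prefix followed by the join of its picks
theorem pvFold_eq (cs : List (List String)) (n : Nat) (g : Nat → String)
    (h : ∀ msa ∈ cs, msa.length ≤ n) :
    cs.foldl pvStep ((List.range n).map g) =
      (List.range n).map (fun i => g i ++ PySem.Str.join "" (cs.map (fun msa => pvPick msa i))) := by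
  induction cs generalizing g with
  | nil => simp [join_empty_nil]
  | cons c cs' ih =>
    rw [List.foldl_cons, pvStep_map_range n g c (h c List.mem_cons_self),
        ih (fun i => g i ++ pvPick c i) (fun m hm => h m (List.mem_cons_of_mem _ hm))]
    apply List.map_congr_left
    intro i _
    rw [List.map_cons, join_empty_cons, String.append_assoc]

theorem combine_eq (chain_msas : List (List String)) :
    combine_chain_msas_py chain_msas = combine_chain_msas_py_alt chain_msas := by
  unfold combine_chain_msas_py combine_chain_msas_py_alt
  by_cases hnil : chain_msas = []
  · simp [hnil]
  · simp only [if_neg hnil]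
    set depth := pvDepth chain_msas with hd
    have hrepl : List.replicate depth "" = (List.range depth).map (fun _ => "") := by
      simp [List.map_const']
    rw [hrepl, pvFold_eq chain_msas depth (fun _ => "") (fun msa hm => len_le_pvDepth _ _ hm)]
    apply List.map_congr_left
    intro i _
    rw [String.empty_append]
    rfl

-- ===== VERDICT (by name: the statement is the Claim_ definition above) =====
theorem combine_chain_msas_py_spec : Claim_equal_combine_chain_msas_py := by
  intro cm _ _
  unfold Spec_combine_chain_msas_py
  exact combine_eq cm
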